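-- pv_equiv track=rewrite | github.com/BenchleyKim/Study | Algorithm_Study/COTE0704/sol01.py | solution
-- ===== SOURCE A (Python) =====
-- def solution(lottery):
--     answer = -1
--     user = {}
--     for user_id, flag in lottery :
--         if user_id not in user :
--             user[user_id] = [1, flag]
--             continue
--         if user[user_id][1] == 0 :
--             if flag == 0 :
--                 user[user_id][0] += 1
--             else :
--                 user[user_id][0] += 1
--                 user[user_id][1] = 1
--             continue
--     total_sum = 0
--     user_cnt =  0
--     for key in user.keys() :
--         if user[key][1] == 1 :
--             user_cnt += 1
--             total_sum += user[key][0]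
--     if user_cnt == 0 :
--         return 0
--     answer = total_sum // user_cnt
--
--     return answer
-- ===== SOURCE B (Python) =====
-- def solution(lottery):
--     # Phase 1: group each user's flags in event order (pure grouping, no counting).
--     flags_by_user = {}
--     for user_id, flag in lottery:
--         flags_by_user.setdefault(user_id, []).append(flag)
--     # Phase 2: a user wins if their first flag is exactly 1 (count 1), or their
--     # first flag is 0 and some later flag is nonzero (count = its 1-based position).
--     total_sum = 0
--     user_cnt = 0
--     for fs in flags_by_user.values():
--         if fs[0] == 1:
--             total_sum += 1
--             user_cnt += 1
--         elif fs[0] == 0: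
--             for pos, f in enumerate(fs[1:], start=2):
--                 if f != 0:
--                     total_sum += pos
--                     user_cnt += 1
--                     break
--     return total_sum // user_cnt if user_cnt else 0
-- ===== Notes on version B (the rewrite author's own statement) =====
-- stated objective: alternative
-- what changed: B first groups the events into a dict mapping each user to their ordered flag list, then scans each user's list once for its first winning flag, replacing A's single pass that threads a (count, flag) state machine per user through the event loop.
import Mathlib
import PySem

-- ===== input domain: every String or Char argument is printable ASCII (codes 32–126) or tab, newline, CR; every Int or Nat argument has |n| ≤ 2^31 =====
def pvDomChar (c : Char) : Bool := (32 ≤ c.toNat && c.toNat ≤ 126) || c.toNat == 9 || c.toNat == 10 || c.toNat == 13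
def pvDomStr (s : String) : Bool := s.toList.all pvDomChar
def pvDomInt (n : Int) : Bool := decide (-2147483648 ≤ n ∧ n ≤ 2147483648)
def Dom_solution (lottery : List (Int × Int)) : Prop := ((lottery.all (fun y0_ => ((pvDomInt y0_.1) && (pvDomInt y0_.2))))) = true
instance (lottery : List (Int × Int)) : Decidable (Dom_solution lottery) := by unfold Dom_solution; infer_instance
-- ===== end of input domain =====

-- B regroups the events per user first and then scans each user's flag list once
-- (different decomposition, same cost); return values proved equal on all inputs.

-- ===== PORT A =====
-- Python's two-element list `user[user_id] = [count, flag]` is ported as the pair (count, flag).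
def solution (lottery : List (Int × Int)) : Int :=
  let user : PySem.Dict Int (Int × Int) :=
    lottery.foldl (fun (user : PySem.Dict Int (Int × Int)) (p : Int × Int) =>
      match user.get? p.1 with        -- `if user_id not in user : … continue` / `user[user_id]`
      | none => user.insert p.1 (1, p.2)
      | some v =>
        if v.2 == 0 then
          if p.2 == 0 then user.insert p.1 (v.1 + 1, v.2)
          else user.insert p.1 (v.1 + 1, 1)
        else user) PySem.Dict.empty
  let r : Int × Int :=                 -- (total_sum, user_cnt)
    user.keys.foldl (fun (acc : Int × Int) key =>
      if (user.getD key (0, 0)).2 == 1 then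
        (acc.1 + (user.getD key (0, 0)).1, acc.2 + 1)
      else acc) (0, 0)
  if r.2 == 0 then 0 else PySem.Int.floordiv r.1 r.2

-- ===== PORT B =====
-- inner `for pos, f in enumerate(fs[1:], start=2): if f != 0: … break`
def firstWin (fs : List Int) (pos : Int) : Option Int :=
  match fs with
  | [] => none
  | f :: rest => if f ≠ 0 then some pos else firstWin rest (pos + 1)

def solution_alt (lottery : List (Int × Int)) : Int :=
  let groups : PySem.Dict Int (List Int) :=   -- flags_by_user via setdefault(…,[]).append
    lottery.foldl (fun g p => g.modify p.1 [] (fun fs => fs ++ [p.2])) PySem.Dict.empty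
  let r : Int × Int :=                 -- (total_sum, user_cnt)
    groups.values.foldl (fun (acc : Int × Int) fs =>
      match fs with
      | [] => acc                      -- unreachable: every grouped list is nonempty
      | f0 :: rest =>
        if f0 == 1 then (acc.1 + 1, acc.2 + 1)
        else if f0 == 0 then
          match firstWin rest 2 with
          | some pos => (acc.1 + pos, acc.2 + 1)
          | none => acc
        else acc) (0, 0)
  if r.2 == 0 then 0 else PySem.Int.floordiv r.1 r.2

-- ===== PRECONDITION & SPEC =====
def Spec_solution (lottery : List (Int × Int)) (out : Int) : Prop := out = solution_alt lottery
instance (lottery : List (Int × Int)) (out : Int) : Decidable (Spec_solution lottery out) := by unfold Spec_solution; infer_instance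

-- ===== CLAIM (what is proved, stated in full; the proofs are below) =====
def Claim_equal_solution : Prop := ∀ (lottery : List (Int × Int)), Dom_solution lottery → Spec_solution lottery (solution lottery)

-- ===== LEMMAS AND PROOFS =====

-- one step of A's per-user state (count, flag)
def pvStep (v : Int × Int) (flag : Int) : Int × Int :=
  if v.2 == 0 then (if flag == 0 then (v.1 + 1, v.2) else (v.1 + 1, 1)) else v

-- A's per-user state as a function of the user's full flag history
def pvAbs (fs : List Int) : Int × Int :=
  match fs with
  | [] => (0, 0)
  | f0 :: rest => rest.foldl pvStep (1, f0)

theorem pvAbs_append (fs : List Int) (flag : Int) (h : fs ≠ []) :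
    pvAbs (fs ++ [flag]) = pvStep (pvAbs fs) flag := by
  match fs with
  | [] => exact absurd rfl h
  | f0 :: rest => simp [pvAbs, List.foldl_append]

theorem pvStep_sticky (l : List Int) (v : Int × Int) (h : ¬ v.2 = 0) :
    l.foldl pvStep v = v := by
  induction l with
  | nil => rfl
  | cons f r ih => simpa [pvStep, h] using ih

theorem pvAbs_zero_run (rest : List Int) (c : Int) :
    rest.foldl pvStep (c, 0) =
      (match firstWin rest (c + 1) with
       | some pos => (pos, 1)
       | none => (c + rest.length, 0)) := by
  induction rest generalizing c with
  | nil => simp [firstWin]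
  | cons f r ih =>
    by_cases hf : f = 0
    · subst hf
      simpa [pvStep, firstWin, add_assoc, add_comm, add_left_comm] using ih (c + 1)
    · simp [pvStep, firstWin, hf, pvStep_sticky]

-- the value the two phase-2 loop bodies agree on, per grouped entry
theorem pvAbs_cases (f0 : Int) (rest : List Int) :
    pvAbs (f0 :: rest) =
      (if f0 = 1 then ((1 : Int), (1 : Int))
       else if f0 = 0 then
         (match firstWin rest 2 with
          | some pos => (pos, 1)
          | none => (1 + rest.length, 0))
       else (1, f0)) := by
  by_cases h1 : f0 = 1
  · subst h1; simp [pvAbs, pvStep_sticky]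
  · by_cases h0 : f0 = 0
    · subst h0
      simpa [pvAbs, h1] using pvAbs_zero_run rest 1
    · simp [pvAbs, h1, h0, pvStep_sticky rest (1, f0) h0]

-- the two fold bodies, named for the invariant
def pvABody (user : PySem.Dict Int (Int × Int)) (p : Int × Int) : PySem.Dict Int (Int × Int) :=
  match user.get? p.1 with
  | none => user.insert p.1 ((1 : Int), p.2)
  | some v =>
    if v.2 == 0 then
      if p.2 == 0 then user.insert p.1 (v.1 + 1, v.2)
      else user.insert p.1 (v.1 + 1, 1)
    else user

def pvBBody (g : PySem.Dict Int (List Int)) (p : Int × Int) : PySem.Dict Int (List Int) :=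
  g.modify p.1 [] (fun fs => fs ++ [p.2])

def pvF (kv : Int × List Int) : Int × (Int × Int) := (kv.1, pvAbs kv.2)

theorem pvGetRel (dA : PySem.Dict Int (Int × Int)) (dB : PySem.Dict Int (List Int))
    (h : dA.items = dB.items.map pvF) (k : Int) :
    dA.get? k = (dB.get? k).map pvAbs := by
  simp only [PySem.Dict.get?, h, List.find?_map]
  have hp : (fun p : Int × (Int × Int) => p.1 == k) ∘ pvF = fun kv : Int × List Int => kv.1 == k := by
    funext kv; rfl
  rw [hp]
  cases List.find? (fun kv : Int × List Int => kv.1 == k) dB.items <;> rfl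

theorem pvInv (l : List (Int × Int)) (dA : PySem.Dict Int (Int × Int)) (dB : PySem.Dict Int (List Int))
    (h : dA.items = dB.items.map pvF)
    (hne : ∀ kv ∈ dB.items, kv.2 ≠ [])
    (hnd : dB.keys.Nodup) :
    (l.foldl pvABody dA).items = (l.foldl pvBBody dB).items.map pvF
    ∧ (∀ kv ∈ (l.foldl pvBBody dB).items, kv.2 ≠ [])
    ∧ (l.foldl pvBBody dB).keys.Nodup := by
  induction l generalizing dA dB with
  | nil => exact ⟨h, hne, hnd⟩
  | cons p l ih =>
    simp only [List.foldl_cons]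
    have hget := pvGetRel dA dB h p.1
    by_cases hc : dB.contains p.1 = true
    · -- key already present: B appends to the entry's list, A updates its (count, flag) in place
      obtain ⟨fs, hBs⟩ : ∃ fs, dB.get? p.1 = some fs := by
        cases hx : dB.get? p.1 with
        | none =>
          rw [(PySem.Dict.get?_eq_none_iff_contains dB p.1).1 hx] at hc
          exact absurd hc (by simp)
        | some fs => exact ⟨fs, rfl⟩
      have hmem : (p.1, fs) ∈ dB.items :=
        (PySem.Dict.get?_eq_some_iff_mem_items dB p.1 fs hnd).1 hBs
      have hfs : fs ≠ [] := hne _ hmem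
      have hAs : dA.get? p.1 = some (pvAbs fs) := by rw [hget, hBs]; rfl
      have hAc : dA.contains p.1 = true := by
        cases hx : dA.contains p.1 with
        | false => rw [(PySem.Dict.get?_eq_none_iff_contains dA p.1).2 hx] at hAs; exact absurd hAs (by simp)
        | true => rfl
      have hBd : pvBBody dB p = dB.insert p.1 (fs ++ [p.2]) := by
        simp [pvBBody, PySem.Dict.modify, PySem.Dict.getD, hBs]
      have hBitems : (pvBBody dB p).items
          = dB.items.map (fun q => if q.1 == p.1 then (p.1, fs ++ [p.2]) else q) := by
        rw [hBd]; exact PySem.Dict.items_insert_of_contains dB _ hc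
      -- the mapped image of B's one step, pointwise
      have hRHS : (pvBBody dB p).items.map pvF
          = dB.items.map (fun q => if q.1 == p.1 then (p.1, pvStep (pvAbs fs) p.2) else pvF q) := by
        rw [hBitems, List.map_map]
        refine List.map_congr_left (fun q _ => ?_)
        by_cases hq : q.1 = p.1 <;>
          simp [pvF, hq, pvAbs_append fs p.2 hfs]
      have hitems : (pvABody dA p).items = (pvBBody dB p).items.map pvF := by
        rw [hRHS]
        by_cases hv : (pvAbs fs).2 = 0
        · -- A overwrites the entry with the stepped state
          have hAd : pvABody dA p = dA.insert p.1 (pvStep (pvAbs fs) p.2) := by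
            simp only [pvABody, hAs, pvStep, hv]
            by_cases hp2 : p.2 = 0 <;> simp [hp2]
          rw [hAd, PySem.Dict.items_insert_of_contains dA _ hAc, h, List.map_map]
          refine List.map_congr_left (fun q _ => ?_)
          by_cases hq : q.1 = p.1 <;> simp [pvF, hq]
        · -- A leaves the dict unchanged, and the stepped state equals the old one
          have hAd : pvABody dA p = dA := by
            simp only [pvABody, hAs]
            simp [show ((pvAbs fs).2 == 0) = false by simpa using hv]
          have hstep : pvStep (pvAbs fs) p.2 = pvAbs fs := by
            simp [pvStep, show ((pvAbs fs).2 == 0) = false by simpa using hv]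
          rw [hAd, h, hstep]
          refine List.map_congr_left (fun q hq => ?_)
          by_cases hq1 : q.1 = p.1
          · have : q = (p.1, fs) :=
              List.inj_on_of_nodup_map hnd hq hmem (by simpa using hq1)
            simp [this, pvF]
          · simp [hq1]
      have hne' : ∀ kv ∈ (pvBBody dB p).items, kv.2 ≠ [] := by
        intro kv hkv
        rw [hBitems] at hkv
        obtain ⟨q, hqmem, hqeq⟩ := List.mem_map.1 hkv
        by_cases hq : q.1 == p.1
        · rw [if_pos hq] at hqeq; simp [← hqeq]
        · rw [if_neg hq] at hqeq; exact hqeq ▸ hne q hqmem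
      have hnd' : (pvBBody dB p).keys.Nodup := by
        rw [hBd, PySem.Dict.keys_insert_of_contains dB _ hc]; exact hnd
      exact ih _ _ hitems hne' hnd'
    · -- fresh key: both sides append a fresh entry
      have hcf : dB.contains p.1 = false := by simpa using hc
      have hBnone : dB.get? p.1 = none := (PySem.Dict.get?_eq_none_iff_contains dB p.1).2 hcf
      have hAnone : dA.get? p.1 = none := by rw [hget, hBnone]; rfl
      have hAcf : dA.contains p.1 = false := (PySem.Dict.get?_eq_none_iff_contains dA p.1).1 hAnone
      have hBd : pvBBody dB p = dB.insert p.1 [p.2] := by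
        simp [pvBBody, PySem.Dict.modify, PySem.Dict.getD, hBnone]
      have hAd : pvABody dA p = dA.insert p.1 (1, p.2) := by simp [pvABody, hAnone]
      have hitems : (pvABody dA p).items = (pvBBody dB p).items.map pvF := by
        rw [hAd, hBd, PySem.Dict.items_insert_of_not_contains dA _ hAcf,
          PySem.Dict.items_insert_of_not_contains dB _ hcf, h]
        simp [pvF, pvAbs]
      have hne' : ∀ kv ∈ (pvBBody dB p).items, kv.2 ≠ [] := by
        intro kv hkv
        rw [hBd, PySem.Dict.items_insert_of_not_contains dB _ hcf] at hkv
        rcases List.mem_append.1 hkv with hkv | hkv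
        · exact hne kv hkv
        · simp at hkv; simp [hkv]
      have hnd' : (pvBBody dB p).keys.Nodup := by
        rw [hBd, PySem.Dict.keys_insert_of_not_contains dB _ hcf]
        have hpk : p.1 ∉ dB.keys := by
          have := PySem.Dict.contains_eq_decide_mem_keys dB p.1
          rw [hcf] at this
          simpa using this.symm
        refine List.nodup_append.2 ⟨hnd, List.nodup_singleton _, ?_⟩
        intro k hk b hb
        have hb' : b = p.1 := by simpa using hb
        exact fun he => hpk ((he.trans hb') ▸ hk)
      exact ih _ _ hitems hne' hnd'

-- phase 2 loop bodies, named
def pvGA (user : PySem.Dict Int (Int × Int)) (acc : Int × Int) (key : Int) : Int × Int :=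
  if (user.getD key (0, 0)).2 == 1 then (acc.1 + (user.getD key (0, 0)).1, acc.2 + 1) else acc

def pvGB (acc : Int × Int) (fs : List Int) : Int × Int :=
  match fs with
  | [] => acc
  | f0 :: rest =>
    if f0 == 1 then (acc.1 + 1, acc.2 + 1)
    else if f0 == 0 then
      match firstWin rest 2 with
      | some pos => (acc.1 + pos, acc.2 + 1)
      | none => acc
    else acc

theorem solution_def (lottery : List (Int × Int)) :
    solution lottery =
      (let user := lottery.foldl pvABody PySem.Dict.empty
       let r := user.keys.foldl (pvGA user) ((0 : Int), (0 : Int))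
       if r.2 == 0 then 0 else PySem.Int.floordiv r.1 r.2) := rfl

theorem solution_alt_def (lottery : List (Int × Int)) :
    solution_alt lottery =
      (let g := lottery.foldl pvBBody PySem.Dict.empty
       let r := g.values.foldl pvGB ((0 : Int), (0 : Int))
       if r.2 == 0 then 0 else PySem.Int.floordiv r.1 r.2) := rfl

theorem pvPhase2 (dA : PySem.Dict Int (Int × Int)) (dB : PySem.Dict Int (List Int))
    (h : dA.items = dB.items.map pvF)
    (hne : ∀ kv ∈ dB.items, kv.2 ≠ [])
    (hnd : dB.keys.Nodup) :
    dA.keys.foldl (pvGA dA) ((0 : Int), (0 : Int)) = dB.values.foldl pvGB ((0 : Int), (0 : Int)) := by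
  have hkeys : dA.keys = dB.keys := by
    simp only [PySem.Dict.keys, h, List.map_map]; rfl
  have hndA : dA.keys.Nodup := hkeys ▸ hnd
  -- both folds as folds over dB.items
  have hA : dA.keys.foldl (pvGA dA) ((0 : Int), (0 : Int))
      = dB.items.foldl (fun a kv => pvGA dA a kv.1) ((0 : Int), (0 : Int)) := by
    rw [hkeys]; simp only [PySem.Dict.keys, List.foldl_map]
  have hB : dB.values.foldl pvGB ((0 : Int), (0 : Int))
      = dB.items.foldl (fun a kv => pvGB a kv.2) ((0 : Int), (0 : Int)) := by
    simp only [PySem.Dict.values, List.foldl_map]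
  rw [hA, hB]
  refine PySem.List.foldl_congr_mem _ _ _ _ (fun acc kv hkv => ?_)
  have hlook : dA.getD kv.1 (0, 0) = pvAbs kv.2 := by
    have hm : (kv.1, pvAbs kv.2) ∈ dA.items := by
      rw [h]; exact List.mem_map.2 ⟨kv, hkv, rfl⟩
    have := PySem.Dict.get?_of_mem_items dA hm hndA
    simp [PySem.Dict.getD, this]
  obtain ⟨f0, rest, hfs⟩ : ∃ f0 rest, kv.2 = f0 :: rest := by
    cases hx : kv.2 with
    | nil => exact absurd hx (hne kv hkv)
    | cons f0 rest => exact ⟨f0, rest, rfl⟩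
  rw [hfs] at hlook
  rw [pvAbs_cases] at hlook
  simp only [pvGA, pvGB, hlook, hfs]
  by_cases h1 : f0 = 1
  · simp [h1]
  · by_cases h0 : f0 = 0
    · cases hw : firstWin rest 2 with
      | none => simp [h0]
      | some pos => simp [h0]
    · simp [h1, h0]

theorem solution_eq (lottery : List (Int × Int)) : solution lottery = solution_alt lottery := by
  obtain ⟨h1, h2, h3⟩ := pvInv lottery PySem.Dict.empty PySem.Dict.empty rfl
    (by intro kv hkv; simp [PySem.Dict.empty] at hkv) (by simp [PySem.Dict.keys_empty])
  rw [solution_def, solution_alt_def]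
  simp only []
  rw [pvPhase2 _ _ h1 h2 h3]

-- ===== VERDICT (by name: the statement is the Claim_ definition above) =====
theorem solution_spec : Claim_equal_solution := by
  intro lottery _
  unfold Spec_solution
  exact solution_eq lottery
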